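-- pv_equiv track=rewrite | github.com/thekozugroup/RLang | dataset/quality_report.py | count_phases
-- ===== SOURCE A (Python) =====
-- PHASE_NAMES = ["Frame", "Explore", "Verify", "Decide"]
--
-- def count_phases(rlang_text: str) -> dict[str, int]:
--     """Count lines (statements) per phase."""
--     phase_lines: dict[str, int] = {p: 0 for p in PHASE_NAMES}
--     if not rlang_text:
--         return phase_lines
--
--     current_phase = None
--     brace_depth = 0
--
--     for line in rlang_text.split("\n"):
--         stripped = line.strip()
--
--         # Detect phase start
--         for phase in PHASE_NAMES:
--             if f"#[phase({phase})]" in stripped: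
--                 current_phase = phase
--                 break
--
--         # Track braces
--         brace_depth += stripped.count("{") - stripped.count("}")
--
--         # Count non-empty lines inside phases as statements
--         if current_phase and stripped and not stripped.startswith("//"):
--             if stripped not in ("{", "}") and not stripped.startswith("#[phase"):
--                 if not stripped.startswith("impl "):
--                     phase_lines[current_phase] += 1
--
--     return phase_lines
-- ===== SOURCE B (Python) =====
-- PHASE_NAMES = ["Frame", "Explore", "Verify", "Decide"]
--
-- def _phase_of(s):
--     for p in PHASE_NAMES:
--         if f"#[phase({p})]" in s:
--             return p
--     return None
--
-- def _counted(s):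
--     return bool(s) and not s.startswith("//") and s not in ("{", "}") \
--         and not s.startswith("#[phase") and not s.startswith("impl ")
--
-- def _split_at_marker(lines):
--     """(maximal markerless prefix, remainder starting at the first marker line)."""
--     i = 0
--     while i < len(lines) and _phase_of(lines[i]) is None:
--         i += 1
--     return lines[:i], lines[i:]
--
-- def count_phases(rlang_text: str) -> dict[str, int]:
--     """Count lines (statements) per phase by cutting the stripped lines into
--     marker-delimited segments and summing each whole segment at once."""
--     counts = {p: 0 for p in PHASE_NAMES}
--     stripped = [line.strip() for line in rlang_text.split("\n")]
--     _, rest = _split_at_marker(stripped)  # lines before the first marker count nowhere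
--     while rest:
--         marker, tail = rest[0], rest[1:]
--         seg, rest = _split_at_marker(tail)
--         counts[_phase_of(marker)] += sum(map(_counted, [marker] + seg))
--     return counts
-- ===== Notes on version B (the rewrite author's own statement) =====
-- stated objective: alternative
-- what changed: B replaces A's per-line state machine (current_phase + dead brace_depth + dict increments inside one loop) with a segment decomposition: it strips all lines up front, splits the line list at the phase-marker lines, and adds each marker-delimited segment's statement count to its phase in one step per segment.
import Mathlib
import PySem

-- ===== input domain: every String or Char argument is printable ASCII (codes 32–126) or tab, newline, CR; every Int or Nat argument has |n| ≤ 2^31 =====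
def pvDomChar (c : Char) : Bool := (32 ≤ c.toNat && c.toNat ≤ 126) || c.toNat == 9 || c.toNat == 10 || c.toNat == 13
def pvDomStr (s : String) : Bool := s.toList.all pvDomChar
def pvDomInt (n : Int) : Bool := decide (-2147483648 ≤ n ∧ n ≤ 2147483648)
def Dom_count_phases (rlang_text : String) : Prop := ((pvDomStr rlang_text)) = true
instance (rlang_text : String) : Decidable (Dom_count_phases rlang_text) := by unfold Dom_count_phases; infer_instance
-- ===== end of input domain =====

-- B cuts the stripped lines into marker-delimited segments and adds each whole
-- segment's statement count at once, instead of A's per-line state machine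
-- (objective: alternative decomposition; same O(n) cost).

-- ===== PORT A =====
def pvPhaseNames : List String := ["Frame", "Explore", "Verify", "Decide"]

-- one step of A's for-loop: state = (phase_lines, current_phase, brace_depth)
def pvStepA (st : PySem.Dict String Int × Option String × Int) (line : String) :
    PySem.Dict String Int × Option String × Int :=
  let stripped := PySem.Str.strip line
  let cur := match pvPhaseNames.find?
      (fun phase => PySem.Str.isIn ("#[phase(" ++ phase ++ ")]") stripped) with
    | some phase => some phase
    | none => st.2.1
  let bd := st.2.2 + (PySem.Str.count stripped "{" : Int) - (PySem.Str.count stripped "}" : Int)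
  let pl :=
    match cur with
    | some cp =>
      if stripped != "" && !(PySem.Str.startswith stripped "//") then
        if (stripped != "{" && stripped != "}") && !(PySem.Str.startswith stripped "#[phase") then
          if !(PySem.Str.startswith stripped "impl ") then
            st.1.modify cp 0 (fun v => v + 1)   -- key always present (seeded), default unused
          else st.1
        else st.1
      else st.1
    | none => st.1
  (pl, cur, bd)

def count_phases (rlang_text : String) : List (String × Int) :=
  let phase_lines : PySem.Dict String Int :=
    pvPhaseNames.foldl (fun d p => d.insert p 0) PySem.Dict.empty
  if rlang_text = "" then phase_lines.items
  else
    (((PySem.Chars.splitOn rlang_text.toList "\n".toList).map String.ofList).foldl pvStepA (phase_lines, none, 0)).1.items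

-- ===== PORT B =====
-- _phase_of: first phase whose marker occurs in s (for-loop with break = find?)
def pvPhaseOf (s : String) : Option String :=
  pvPhaseNames.find? (fun p => PySem.Str.isIn ("#[phase(" ++ p ++ ")]") s)

-- _counted
def pvCounted (s : String) : Bool :=
  s != "" && !(PySem.Str.startswith s "//") && s != "{" && s != "}" &&
  !(PySem.Str.startswith s "#[phase") && !(PySem.Str.startswith s "impl ")

-- _split_at_marker: the index scan `while i < len(lines) and _phase_of(lines[i]) is None`
-- followed by (lines[:i], lines[i:]), rendered as the equivalent structural scan
-- (exact: returns the maximal markerless prefix and the remainder)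
def pvSplitAtMarker : List String → List String × List String
  | [] => ([], [])
  | s :: t =>
    if (pvPhaseOf s).isSome then ([], s :: t)
    else
      let r := pvSplitAtMarker t
      (s :: r.1, r.2)

lemma pvSplit_snd_len : ∀ (t : List String), (pvSplitAtMarker t).2.length ≤ t.length := by
  intro t
  induction t with
  | nil => simp [pvSplitAtMarker]
  | cons s t ih =>
    simp only [pvSplitAtMarker]
    split
    · simp
    · simpa using Nat.le_succ_of_le ih

-- B's while loop over the remaining segments
def pvSegments (counts : PySem.Dict String Int) (rest : List String) : PySem.Dict String Int :=
  match rest with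
  | [] => counts
  | marker :: tail =>
    let r := pvSplitAtMarker tail
    -- counts[_phase_of(marker)] += sum(map(_counted, [marker] + seg)); the key
    -- _phase_of(marker) is always present (rest starts at a marker line)
    pvSegments (counts.modify ((pvPhaseOf marker).getD "") 0
      (fun v => v + ((marker :: r.1).map (fun s => if pvCounted s then (1 : Int) else 0)).sum)) r.2
termination_by rest.length
decreasing_by exact Nat.lt_succ_of_le (pvSplit_snd_len tail)

def count_phases_alt (rlang_text : String) : List (String × Int) :=
  let counts : PySem.Dict String Int :=
    pvPhaseNames.foldl (fun d p => d.insert p 0) PySem.Dict.empty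
  let stripped := ((PySem.Chars.splitOn rlang_text.toList "\n".toList).map String.ofList).map PySem.Str.strip
  (pvSegments counts (pvSplitAtMarker stripped).2).items

-- ===== PRECONDITION & SPEC =====
def Spec_count_phases (rlang_text : String) (out : List (String × Int)) : Prop := out = count_phases_alt rlang_text
instance (rlang_text : String) (out : List (String × Int)) : Decidable (Spec_count_phases rlang_text out) := by unfold Spec_count_phases; infer_instance

-- ===== CLAIM (what is proved, stated in full; the proofs are below) =====
def Claim_equal_count_phases : Prop := ∀ (rlang_text : String), Dom_count_phases rlang_text → Spec_count_phases rlang_text (count_phases rlang_text)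

-- ===== LEMMAS AND PROOFS =====

-- the dict A's loop maintains, with the four fixed keys
def pvDict4 (a b c d : Int) : PySem.Dict String Int :=
  PySem.Dict.mk [("Frame", a), ("Explore", b), ("Verify", c), ("Decide", d)]

def pvPred (s : String) : Bool := (pvPhaseOf (PySem.Str.strip s)).isNone

-- counted-statement sum of a (raw) segment
def pvCSum (l : List String) : Int :=
  (l.map (fun s => if pvCounted (PySem.Str.strip s) then (1 : Int) else 0)).sum

lemma pvInit_eq : pvPhaseNames.foldl (fun d p => d.insert p 0) PySem.Dict.empty = pvDict4 0 0 0 0 := by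
  decide

lemma pvModify4 (a b c d k : Int) (p : String) (hp : p ∈ pvPhaseNames) :
    (pvDict4 a b c d).modify p 0 (fun v => v + k) =
      pvDict4 (if p = "Frame" then a + k else a) (if p = "Explore" then b + k else b)
              (if p = "Verify" then c + k else c) (if p = "Decide" then d + k else d) := by
  simp only [pvPhaseNames, List.mem_cons, List.not_mem_nil, or_false] at hp
  rcases hp with rfl | rfl | rfl | rfl <;> rfl

-- A's nested ifs compute the same branch as pvCounted's single conjunction
lemma pvCond_eq {γ : Type} (b1 b2 b3 b4 b5 b6 : Bool) (X Y : γ) :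
    (if b1 && b2 then if (b3 && b4) && b5 then if b6 then X else Y else Y else Y)
      = if b1 && b2 && b3 && b4 && b5 && b6 then X else Y := by
  cases b1 <;> cases b2 <;> cases b3 <;> cases b4 <;> cases b5 <;> cases b6 <;> rfl

-- splitting the stripped lines = take/dropWhile on the raw lines, stripped after
lemma pvSplit_map (t : List String) :
    pvSplitAtMarker (t.map PySem.Str.strip) =
      ((t.takeWhile pvPred).map PySem.Str.strip, (t.dropWhile pvPred).map PySem.Str.strip) := by
  induction t with
  | nil => rfl
  | cons s t ih =>
    simp only [List.map_cons, pvSplitAtMarker, List.takeWhile, List.dropWhile]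
    by_cases h : pvPred s
    · have : ¬ (pvPhaseOf (PySem.Str.strip s)).isSome := by
        simp [pvPred] at h; simp [h]
      simp [h, this, ih]
    · have h2 : (pvPhaseOf (PySem.Str.strip s)).isSome := by
        simp [pvPred, Option.isNone_iff_eq_none] at h
        simp [Option.isSome_iff_ne_none, h]
      simp [h, h2]

-- folding A's step over a markerless segment with an active phase p ∈ names
lemma pvSegFoldA : ∀ (seg : List String), (∀ s ∈ seg, pvPred s = true) →
    ∀ (a b c d bd : Int) (p : String), p ∈ pvPhaseNames →
    ∃ bd', seg.foldl pvStepA (pvDict4 a b c d, some p, bd) =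
      (pvDict4 (if p = "Frame" then a + pvCSum seg else a)
               (if p = "Explore" then b + pvCSum seg else b)
               (if p = "Verify" then c + pvCSum seg else c)
               (if p = "Decide" then d + pvCSum seg else d), some p, bd') := by
  intro seg
  induction seg with
  | nil =>
    intro _ a b c d bd p hp
    exact ⟨bd, by simp [pvCSum]⟩
  | cons s t ih =>
    intro hall a b c d bd p hp
    have hs : pvPred s = true := hall s (by simp)
    have hnone : pvPhaseOf (PySem.Str.strip s) = none := by
      simpa [pvPred, Option.isNone_iff_eq_none] using hs
    simp only [List.foldl_cons, pvStepA]
    rw [show (pvPhaseNames.find?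
        (fun phase => PySem.Str.isIn ("#[phase(" ++ phase ++ ")]") (PySem.Str.strip s))) = none from hnone]
    simp only
    rw [pvCond_eq]
    by_cases hc : pvCounted (PySem.Str.strip s) = true
    · have hc' : (PySem.Str.strip s != "" && !PySem.Str.startswith (PySem.Str.strip s) "//" &&
          PySem.Str.strip s != "{" && PySem.Str.strip s != "}" &&
          !PySem.Str.startswith (PySem.Str.strip s) "#[phase" &&
          !PySem.Str.startswith (PySem.Str.strip s) "impl ") = true := by
        simpa [pvCounted] using hc
      rw [if_pos hc', pvModify4 a b c d 1 p hp]
      obtain ⟨bd', hbd⟩ := ih (fun x hx => hall x (by simp [hx]))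
        (if p = "Frame" then a + 1 else a) (if p = "Explore" then b + 1 else b)
        (if p = "Verify" then c + 1 else c) (if p = "Decide" then d + 1 else d)
        _ p hp
      refine ⟨bd', ?_⟩
      rw [hbd]
      have : pvCSum (s :: t) = 1 + pvCSum t := by simp [pvCSum, hc]
      simp only [pvPhaseNames, List.mem_cons, List.not_mem_nil, or_false] at hp
      rcases hp with rfl | rfl | rfl | rfl <;> simp [this] <;> ring_nf
    · have hc' : ¬ ((PySem.Str.strip s != "" && !PySem.Str.startswith (PySem.Str.strip s) "//" &&
          PySem.Str.strip s != "{" && PySem.Str.strip s != "}" &&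
          !PySem.Str.startswith (PySem.Str.strip s) "#[phase" &&
          !PySem.Str.startswith (PySem.Str.strip s) "impl ") = true) := by
        simpa [pvCounted] using hc
      rw [if_neg hc']
      obtain ⟨bd', hbd⟩ := ih (fun x hx => hall x (by simp [hx])) a b c d _ p hp
      refine ⟨bd', ?_⟩
      rw [hbd]
      have : pvCSum (s :: t) = pvCSum t := by
        simp [pvCSum, hc]
      simp [this]

-- main correspondence: A's fold over a suffix that starts at a marker line (or is
-- empty) equals B's segment recursion on the stripped suffix
lemma pvMain : ∀ (n : ℕ) (rest : List String), rest.length ≤ n →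
    (rest = [] ∨ ∃ m t, rest = m :: t ∧ (pvPhaseOf (PySem.Str.strip m)).isSome) →
    ∀ (cur : Option String) (a b c d bd : Int),
    (rest.foldl pvStepA (pvDict4 a b c d, cur, bd)).1 =
      pvSegments (pvDict4 a b c d) (rest.map PySem.Str.strip) := by
  intro n
  induction n with
  | zero =>
    intro rest hlen _ cur a b c d bd
    have : rest = [] := List.eq_nil_of_length_eq_zero (Nat.le_zero.mp hlen)
    subst this; simp [pvSegments]
  | succ n ih =>
    intro rest hlen hshape cur a b c d bd
    rcases hshape with rfl | ⟨m, t, rfl, hm⟩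
    · simp [pvSegments]
    · obtain ⟨q, hq⟩ := Option.isSome_iff_exists.mp hm
      have hqmem : q ∈ pvPhaseNames := List.mem_of_find?_eq_some hq
      -- unfold one B-step
      have hsplit := pvSplit_map t
      have hseg : pvSegments (pvDict4 a b c d) ((m :: t).map PySem.Str.strip) =
          pvSegments ((pvDict4 a b c d).modify q 0
            (fun v => v + ((PySem.Str.strip m :: (t.takeWhile pvPred).map PySem.Str.strip).map
              (fun s => if pvCounted s then (1 : Int) else 0)).sum))
            ((t.dropWhile pvPred).map PySem.Str.strip) := by
        rw [List.map_cons, pvSegments, hsplit]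
        simp [hq]
      -- A side: first step on the marker line m
      have tdecomp : t = t.takeWhile pvPred ++ t.dropWhile pvPred := (List.takeWhile_append_dropWhile).symm
      -- value added for m itself
      set S : Int := ((PySem.Str.strip m :: (t.takeWhile pvPred).map PySem.Str.strip).map
              (fun s => if pvCounted s then (1 : Int) else 0)).sum with hS
      have hSval : S = (if pvCounted (PySem.Str.strip m) then (1:Int) else 0) + pvCSum (t.takeWhile pvPred) := by
        simp [hS, pvCSum, List.map_map, Function.comp_def]
      -- fold over m
      simp only [List.foldl_cons, pvStepA]
      rw [show (pvPhaseNames.find?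
          (fun phase => PySem.Str.isIn ("#[phase(" ++ phase ++ ")]") (PySem.Str.strip m))) = some q from hq]
      simp only
      rw [pvCond_eq]
      -- after m: dict is pvDict4 shifted by im := ind(counted m), cur = some q
      set im : Int := if pvCounted (PySem.Str.strip m) then (1:Int) else 0 with him
      have hfold1 : (if (PySem.Str.strip m != "" && !PySem.Str.startswith (PySem.Str.strip m) "//" &&
            PySem.Str.strip m != "{" && PySem.Str.strip m != "}" &&
            !PySem.Str.startswith (PySem.Str.strip m) "#[phase" &&
            !PySem.Str.startswith (PySem.Str.strip m) "impl ") then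
            (pvDict4 a b c d).modify q 0 (fun v => v + 1) else pvDict4 a b c d) =
          pvDict4 (if q = "Frame" then a + im else a) (if q = "Explore" then b + im else b)
                  (if q = "Verify" then c + im else c) (if q = "Decide" then d + im else d) := by
        by_cases hc : pvCounted (PySem.Str.strip m) = true
        · have hc' : (PySem.Str.strip m != "" && !PySem.Str.startswith (PySem.Str.strip m) "//" &&
              PySem.Str.strip m != "{" && PySem.Str.strip m != "}" &&
              !PySem.Str.startswith (PySem.Str.strip m) "#[phase" &&
              !PySem.Str.startswith (PySem.Str.strip m) "impl ") = true := by simpa [pvCounted] using hc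
          rw [if_pos hc', pvModify4 a b c d 1 q hqmem]
          simp [him, hc]
        · have hc' : ¬ ((PySem.Str.strip m != "" && !PySem.Str.startswith (PySem.Str.strip m) "//" &&
              PySem.Str.strip m != "{" && PySem.Str.strip m != "}" &&
              !PySem.Str.startswith (PySem.Str.strip m) "#[phase" &&
              !PySem.Str.startswith (PySem.Str.strip m) "impl ") = true) := by simpa [pvCounted] using hc
          rw [if_neg hc']
          simp [him, hc]
      rw [hfold1]
      -- fold over the markerless prefix of t, then the rest by IH
      conv_lhs => rw [tdecomp, List.foldl_append]
      obtain ⟨bd', hbd⟩ := pvSegFoldA (t.takeWhile pvPred)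
        (fun s hs => List.mem_takeWhile_imp hs)
        (if q = "Frame" then a + im else a) (if q = "Explore" then b + im else b)
        (if q = "Verify" then c + im else c) (if q = "Decide" then d + im else d)
        _ q hqmem
      rw [hbd]
      have hdw : (t.dropWhile pvPred) = [] ∨ ∃ m' t', t.dropWhile pvPred = m' :: t' ∧
          (pvPhaseOf (PySem.Str.strip m')).isSome := by
        cases hdw : t.dropWhile pvPred with
        | nil => exact Or.inl rfl
        | cons m' t' =>
          refine Or.inr ⟨m', t', rfl, ?_⟩
          have := List.head?_dropWhile_not pvPred t
          rw [hdw] at this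
          simp [pvPred, Option.isSome_iff_ne_none] at this ⊢
          exact this
      have hlen' : (t.dropWhile pvPred).length ≤ n := by
        have h1 : (t.dropWhile pvPred).length ≤ t.length := List.length_dropWhile_le pvPred t
        have h2 : t.length ≤ n := by simpa using Nat.le_of_succ_le_succ hlen
        omega
      rw [ih _ hlen' hdw]
      rw [hseg, pvModify4 _ _ _ _ S q hqmem]
      -- component-wise arithmetic: (x + im) + csum = x + S on the q-component
      simp only [pvPhaseNames, List.mem_cons, List.not_mem_nil, or_false] at hqmem
      rcases hqmem with rfl | rfl | rfl | rfl <;>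
        simp [hSval, him] <;> ring_nf
-- skipping the markerless prefix with current_phase = None leaves the dict unchanged
lemma pvSkip : ∀ (pre : List String), (∀ s ∈ pre, pvPred s = true) →
    ∀ (D : PySem.Dict String Int) (bd : Int),
    ∃ bd', pre.foldl pvStepA (D, none, bd) = (D, none, bd') := by
  intro pre
  induction pre with
  | nil => exact fun _ D bd => ⟨bd, rfl⟩
  | cons s t ih =>
    intro hall D bd
    have hnone : pvPhaseOf (PySem.Str.strip s) = none := by
      simpa [pvPred, Option.isNone_iff_eq_none] using hall s (by simp)
    simp only [List.foldl_cons, pvStepA]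
    rw [show (pvPhaseNames.find?
        (fun phase => PySem.Str.isIn ("#[phase(" ++ phase ++ ")]") (PySem.Str.strip s))) = none from hnone]
    exact ih (fun x hx => hall x (by simp [hx])) D _

-- ===== VERDICT (by name: the statement is the Claim_ definition above) =====
theorem count_phases_spec : Claim_equal_count_phases := by
  intro t _
  unfold Spec_count_phases
  by_cases h : t = ""
  · subst h
    simp only [count_phases, count_phases_alt]
    rw [show (pvSplitAtMarker
          (List.map PySem.Str.strip (List.map String.ofList (PySem.Chars.splitOn "".toList "\n".toList)))).2
        = ([] : List String) from by decide]
    rw [pvSegments]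
    simp
  · simp only [count_phases, count_phases_alt, if_neg h, pvInit_eq]
    set lines := ((PySem.Chars.splitOn t.toList "\n".toList).map String.ofList) with hlines
    have hdecomp : lines = lines.takeWhile pvPred ++ lines.dropWhile pvPred :=
      (List.takeWhile_append_dropWhile).symm
    conv_lhs => rw [hdecomp, List.foldl_append]
    obtain ⟨bd', hbd⟩ := pvSkip (lines.takeWhile pvPred)
      (fun s hs => List.mem_takeWhile_imp hs) (pvDict4 0 0 0 0) 0
    rw [hbd]
    have hdw : (lines.dropWhile pvPred) = [] ∨ ∃ m' t', lines.dropWhile pvPred = m' :: t' ∧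
        (pvPhaseOf (PySem.Str.strip m')).isSome := by
      cases hdw : lines.dropWhile pvPred with
      | nil => exact Or.inl rfl
      | cons m' t' =>
        refine Or.inr ⟨m', t', rfl, ?_⟩
        have := List.head?_dropWhile_not pvPred lines
        rw [hdw] at this
        simp [pvPred, Option.isSome_iff_ne_none] at this ⊢
        exact this
    rw [pvMain (lines.dropWhile pvPred).length _ le_rfl hdw]
    rw [show (pvSplitAtMarker (lines.map PySem.Str.strip)).2
          = (lines.dropWhile pvPred).map PySem.Str.strip from by rw [pvSplit_map]]
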